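-- pv_equiv track=rewrite | github.com/cytochronne/State-Estimation-AMP-Lab | rsl_rl/rsl_rl/modules/terrain_aware_actor_critic.py | _resolve_height_map_shape
-- ===== SOURCE A (Python) =====
-- import math
-- from typing import Sequence, Tuple
--
-- def _resolve_height_map_shape(height_dim: int, explicit_shape: Tuple[int, int] | None) -> Tuple[int, int]:
--     if height_dim == 0:
--         return 0, 0
--
--     if explicit_shape is not None:
--         if explicit_shape[0] * explicit_shape[1] != height_dim:
--             raise ValueError(
--                 "Provided height_map_shape does not match height_obs_dim. "
--                 f"Got {explicit_shape[0]}x{explicit_shape[1]} != {height_dim}."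
--             )
--         return explicit_shape
--
--     factors: list[Tuple[int, int]] = []
--     for h in range(1, int(math.sqrt(height_dim)) + 1):
--         if height_dim % h == 0:
--             factors.append((h, height_dim // h))
--
--     if not factors:
--         raise ValueError(f"Unable to factorize height_obs_dim={height_dim} into a 2D map shape.")
--
--     # choose the pair with the smallest aspect ratio difference to keep the map near-square
--     best_h, best_w = min(factors, key=lambda hw: abs(hw[0] - hw[1]))
--     return best_h, best_w
-- ===== SOURCE B (Python) =====
-- import math
-- from typing import Tuple
--
--
-- def _resolve_height_map_shape(height_dim: int, explicit_shape: Tuple[int, int] | None) -> Tuple[int, int]: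
--     if height_dim == 0:
--         return 0, 0
--
--     if explicit_shape is not None:
--         if explicit_shape[0] * explicit_shape[1] != height_dim:
--             raise ValueError(
--                 "Provided height_map_shape does not match height_obs_dim. "
--                 f"Got {explicit_shape[0]}x{explicit_shape[1]} != {height_dim}."
--             )
--         return explicit_shape
--
--     # Single downward scan: the first divisor at or below sqrt(height_dim)
--     # is the near-square height; no factor table, no min-selection.
--     for h in range(math.isqrt(height_dim), 0, -1):
--         if height_dim % h == 0:
--             return h, height_dim // h
--
--     raise ValueError(f"Unable to factorize height_obs_dim={height_dim} into a 2D map shape.")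
-- ===== Notes on version B (the rewrite author's own statement) =====
-- stated objective: simpler
-- what changed: Replaces the build-all-factors-then-min selection with a single downward early-return scan from isqrt(height_dim): the first divisor found is the near-square pair, so no list and no key-based min are needed.
import Mathlib
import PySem

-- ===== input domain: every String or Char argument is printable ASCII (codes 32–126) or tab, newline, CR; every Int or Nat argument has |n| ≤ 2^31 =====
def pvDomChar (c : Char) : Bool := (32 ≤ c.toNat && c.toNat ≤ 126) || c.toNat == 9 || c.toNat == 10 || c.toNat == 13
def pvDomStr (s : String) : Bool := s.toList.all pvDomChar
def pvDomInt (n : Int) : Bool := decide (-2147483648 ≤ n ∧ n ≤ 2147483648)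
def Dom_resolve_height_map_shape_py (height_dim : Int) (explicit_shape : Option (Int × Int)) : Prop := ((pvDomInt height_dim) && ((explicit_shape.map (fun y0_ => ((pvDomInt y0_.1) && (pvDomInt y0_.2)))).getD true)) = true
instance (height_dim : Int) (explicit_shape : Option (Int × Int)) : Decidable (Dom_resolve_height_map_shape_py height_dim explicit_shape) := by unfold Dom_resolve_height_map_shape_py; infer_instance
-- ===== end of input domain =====

-- B replaces A's build-all-factors-then-min selection with a single downward
-- early-return scan from isqrt(height_dim); objective: simpler (same O(√n) cost).

-- ===== PORT A =====
-- int(math.sqrt(n)) is ported as Nat.sqrt n.toNat: exact on the domain 0 ≤ n ≤ 2^31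
-- (there the correctly rounded double sqrt truncates to the integer square root).
def resolve_height_map_shape_py (height_dim : Int) (explicit_shape : Option (Int × Int)) : Int × Int :=
  if height_dim = 0 then (0, 0)
  else
    match explicit_shape with
    | some es =>
        if es.1 * es.2 ≠ height_dim then (0, 0)   -- raise ValueError: excluded by Pre_
        else es
    | none =>
        let factors : List (Int × Int) :=
          (PySem.List.pyRange 1 ((Nat.sqrt height_dim.toNat : Int) + 1) 1).foldl
            (fun acc h =>
              if PySem.Int.mod height_dim h = 0 then
                acc ++ [(h, PySem.Int.floordiv height_dim h)]
              else acc) []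
        match PySem.List.min? factors (fun hw => |hw.1 - hw.2|) with
        | none => (0, 0)                           -- 'if not factors: raise ValueError': excluded by Pre_
        | some bw => bw

-- ===== PORT B =====
-- 'for h in range(math.isqrt(height_dim), 0, -1): if height_dim % h == 0: return …'
-- as structural recursion counting the loop variable down.
def pvScanDown (n : Int) : Nat → Int × Int
  | 0 => (0, 0)                                    -- loop exhausted: raise ValueError, excluded by Pre_
  | h + 1 =>
      if PySem.Int.mod n ((h : Int) + 1) = 0 then (((h : Int) + 1), PySem.Int.floordiv n ((h : Int) + 1))
      else pvScanDown n h

def resolve_height_map_shape_py_alt (height_dim : Int) (explicit_shape : Option (Int × Int)) : Int × Int :=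
  if height_dim = 0 then (0, 0)
  else
    match explicit_shape with
    | some es =>
        if es.1 * es.2 ≠ height_dim then (0, 0)   -- raise ValueError: excluded by Pre_
        else es
    | none => pvScanDown height_dim (Nat.sqrt height_dim.toNat)

-- ===== PRECONDITION & SPEC =====
-- Pre_ excludes exactly the inputs where A raises ValueError: a provided explicit
-- shape whose product mismatches a nonzero height_dim, and a negative height_dim
-- with no explicit shape (math.sqrt raises there).
def Pre_resolve_height_map_shape_py (height_dim : Int) (explicit_shape : Option (Int × Int)) : Prop :=
  height_dim = 0 ∨
    (if explicit_shape.isSome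
     then (explicit_shape.getD (0, 0)).1 * (explicit_shape.getD (0, 0)).2 = height_dim
     else 1 ≤ height_dim)
instance (height_dim : Int) (explicit_shape : Option (Int × Int)) : Decidable (Pre_resolve_height_map_shape_py height_dim explicit_shape) := by unfold Pre_resolve_height_map_shape_py; infer_instance

def pvWitness_resolve_height_map_shape_py : Int × (Option (Int × Int)) := (12, none)

def Spec_resolve_height_map_shape_py (height_dim : Int) (explicit_shape : Option (Int × Int)) (out : Int × Int) : Prop := out = resolve_height_map_shape_py_alt height_dim explicit_shape
instance (height_dim : Int) (explicit_shape : Option (Int × Int)) (out : Int × Int) : Decidable (Spec_resolve_height_map_shape_py height_dim explicit_shape out) := by unfold Spec_resolve_height_map_shape_py; infer_instance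

-- ===== CLAIM (what is proved, stated in full; the proofs are below) =====
def Claim_equal_resolve_height_map_shape_py : Prop := ∀ (height_dim : Int) (explicit_shape : Option (Int × Int)), Dom_resolve_height_map_shape_py height_dim explicit_shape → Pre_resolve_height_map_shape_py height_dim explicit_shape → Spec_resolve_height_map_shape_py height_dim explicit_shape (resolve_height_map_shape_py height_dim explicit_shape)

-- ===== LEMMAS AND PROOFS =====

-- A's appending loop is the filter-then-map of the range.
lemma pv_factors_eq (n : Int) (s : Nat) :
    (PySem.List.pyRange 1 ((s : Int) + 1) 1).foldl
      (fun acc h => if PySem.Int.mod n h = 0 then acc ++ [(h, PySem.Int.floordiv n h)] else acc) ([] : List (Int × Int))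
    = ((PySem.List.pyRange 1 ((s : Int) + 1) 1).filter (fun h => decide (PySem.Int.mod n h = 0))).map
        (fun h => (h, PySem.Int.floordiv n h)) := by
  simpa using PySem.List.foldl_append_ite (fun h => PySem.Int.mod n h = 0)
    (fun h => (h, PySem.Int.floordiv n h)) (PySem.List.pyRange 1 ((s : Int) + 1) 1) []

-- membership in A's factor list, characterised
lemma pv_mem_factors {n : Int} {s : Nat} {p : Int × Int} :
    p ∈ ((PySem.List.pyRange 1 ((s : Int) + 1) 1).filter (fun h => decide (PySem.Int.mod n h = 0))).map
        (fun h => (h, PySem.Int.floordiv n h))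
    ↔ ∃ h : Int, 1 ≤ h ∧ h ≤ (s : Int) ∧ PySem.Int.mod n h = 0 ∧ p = (h, PySem.Int.floordiv n h) := by
  simp only [List.mem_map, List.mem_filter, PySem.List.mem_pyRange_one, decide_eq_true_eq]
  constructor
  · rintro ⟨h, ⟨⟨h1, h2⟩, h3⟩, rfl⟩
    exact ⟨h, h1, by omega, h3, rfl⟩
  · rintro ⟨h, h1, h2, h3, rfl⟩
    exact ⟨h, ⟨⟨h1, by omega⟩, h3⟩, rfl⟩

-- B's downward scan returns the LARGEST divisor of n in [1, s], if one exists.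
lemma pv_scan_spec (n : Int) (s : Nat)
    (hex : ∃ h : Nat, 1 ≤ h ∧ h ≤ s ∧ PySem.Int.mod n (h : Int) = 0) :
    ∃ h0 : Nat, 1 ≤ h0 ∧ h0 ≤ s ∧ PySem.Int.mod n (h0 : Int) = 0 ∧
      pvScanDown n s = ((h0 : Int), PySem.Int.floordiv n (h0 : Int)) ∧
      ∀ h : Nat, h0 < h → h ≤ s → PySem.Int.mod n (h : Int) ≠ 0 := by
  induction s with
  | zero => obtain ⟨h, h1, h2, _⟩ := hex; omega
  | succ s ih =>
    by_cases hd : PySem.Int.mod n ((s : Int) + 1) = 0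
    · refine ⟨s + 1, by omega, le_refl _, by push_cast; exact hd, ?_, ?_⟩
      · simp only [pvScanDown, if_pos hd]; push_cast; rfl
      · intro h hlt hle; omega
    · obtain ⟨h, h1, h2, h3⟩ := hex
      have hne : h ≠ s + 1 := by
        rintro rfl; apply hd; push_cast at h3; exact h3
      obtain ⟨h0, g1, g2, g3, g4, g5⟩ := ih ⟨h, h1, by omega, h3⟩
      refine ⟨h0, g1, by omega, g3, ?_, ?_⟩
      · simp only [pvScanDown, if_neg hd]; exact g4
      · intro k hk1 hk2
        rcases Nat.lt_succ_iff_lt_or_eq.mp (Nat.lt_succ_of_le hk2) with _ | rfl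
        · exact fun hc => g5 k hk1 (by omega) hc
        · intro hc; apply hd; push_cast at hc; exact hc

-- among divisors at or below the square root, a larger divisor has a strictly
-- smaller aspect-ratio key |h - n/h|
lemma pv_key_lt {n h h0 : Int} (h1 : 1 ≤ h) (hh : h < h0)
    (hs0 : h0 * h0 ≤ n) (hd : h ∣ n) (hd0 : h0 ∣ n) :
    |h0 - n / h0| < |h - n / h| := by
  have hp : 0 < h := h1
  have hp0 : 0 < h0 := by omega
  have hq0 : h0 ≤ n / h0 := (Int.le_ediv_iff_mul_le hp0).mpr hs0
  have hq : h ≤ n / h := (Int.le_ediv_iff_mul_le hp).mpr (by nlinarith)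
  have e0 : n / h0 * h0 = n := Int.ediv_mul_cancel hd0
  have e : n / h * h = n := Int.ediv_mul_cancel hd
  have hqpos0 : 0 < n / h0 := by nlinarith
  have hlt : n / h0 < n / h := by nlinarith
  rw [abs_of_nonpos (by omega), abs_of_nonpos (by omega)]
  omega

-- the heart: A's min-by-key over the factor list is exactly B's scan result
lemma pv_min_eq_scan (n : Int) (hn : 1 ≤ n) :
    PySem.List.min?
      (((PySem.List.pyRange 1 ((Nat.sqrt n.toNat : Int) + 1) 1).filter
          (fun h => decide (PySem.Int.mod n h = 0))).map (fun h => (h, PySem.Int.floordiv n h)))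
      (fun hw => |hw.1 - hw.2|)
    = some (pvScanDown n (Nat.sqrt n.toNat)) := by
  set s := Nat.sqrt n.toNat with hs
  have hs1 : 1 ≤ s := Nat.sqrt_pos.mpr (by omega)
  have hex : ∃ h : Nat, 1 ≤ h ∧ h ≤ s ∧ PySem.Int.mod n (h : Int) = 0 :=
    ⟨1, le_refl _, hs1, by simp [PySem.Int.mod]⟩
  obtain ⟨h0, g1, g2, g3, g4, g5⟩ := pv_scan_spec n s hex
  have hmem : ((h0 : Int), PySem.Int.floordiv n (h0 : Int)) ∈
      ((PySem.List.pyRange 1 ((s : Int) + 1) 1).filter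
          (fun h => decide (PySem.Int.mod n h = 0))).map (fun h => (h, PySem.Int.floordiv n h)) :=
    pv_mem_factors.mpr ⟨(h0 : Int), by exact_mod_cast g1, by exact_mod_cast g2, g3, rfl⟩
  have hsq : ∀ k : Int, 1 ≤ k → k ≤ (s : Int) → k * k ≤ n := by
    intro k k1 k2
    have : k.toNat ≤ s := by omega
    have h2 : k.toNat * k.toNat ≤ n.toNat := Nat.le_sqrt.mp (hs ▸ this)
    have := Int.toNat_of_nonneg (by omega : (0:Int) ≤ k)
    have := Int.toNat_of_nonneg (by omega : (0:Int) ≤ n)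
    nlinarith [h2, Int.toNat_of_nonneg (show (0:Int) ≤ k by omega)]
  cases hm : PySem.List.min?
      (((PySem.List.pyRange 1 ((s : Int) + 1) 1).filter
          (fun h => decide (PySem.Int.mod n h = 0))).map (fun h => (h, PySem.Int.floordiv n h)))
      (fun hw => |hw.1 - hw.2|) with
  | none =>
      rw [(PySem.List.min?_eq_none_iff _ _).mp hm] at hmem
      exact absurd hmem (List.not_mem_nil)
  | some m =>
      have hmmem := PySem.List.min?_mem hm
      have hmin := PySem.List.min?_isMin hm
      obtain ⟨h, h1, h2, h3, rfl⟩ := pv_mem_factors.mp hmmem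
      rw [g4]
      rcases lt_trichotomy h ((h0 : Int)) with hlt | heq | hgt
      · -- h0's key is strictly smaller, contradicting minimality of (h, n/h)
        have hs0 : (h0 : Int) * (h0 : Int) ≤ n := hsq _ (by exact_mod_cast g1) (by exact_mod_cast g2)
        have hd : h ∣ n := (PySem.Int.mod_eq_zero_iff_dvd n h).mp h3
        have hd0 : ((h0 : Int)) ∣ n := (PySem.Int.mod_eq_zero_iff_dvd n _).mp g3
        have hkey := pv_key_lt h1 hlt hs0 hd hd0
        have hle := hmin _ hmem
        rw [PySem.Int.floordiv_eq_ediv_of_pos (by omega : (0:Int) < h),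
            PySem.Int.floordiv_eq_ediv_of_pos (by exact_mod_cast g1 : (0:Int) < (h0:Int))] at hle
        simp only at hle
        omega
      · rw [heq]
      · -- a divisor above h0 but within [1, s] contradicts h0's maximality
        exfalso
        have : h.toNat ≤ s := by omega
        refine g5 h.toNat (by omega) this ?_
        have : ((h.toNat : Int)) = h := Int.toNat_of_nonneg (by omega)
        rw [this]; exact h3

-- ===== VERDICT (by name: the statement is the Claim_ definition above) =====
theorem resolve_height_map_shape_py_spec : Claim_equal_resolve_height_map_shape_py := by
  intro n es _ hpre
  unfold Spec_resolve_height_map_shape_py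
  unfold resolve_height_map_shape_py resolve_height_map_shape_py_alt
  by_cases h0 : n = 0
  · simp [h0]
  · simp only [if_neg h0]
    cases es with
    | some p => rfl
    | none =>
        have hn : 1 ≤ n := by
          rcases hpre with h | h
          · exact absurd h h0
          · simpa using h
        simp only []
        rw [pv_factors_eq, pv_min_eq_scan n hn]
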